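-- pv_equiv track=rewrite | github.com/ericmerle3789/Collatz-Junction-Theorem | scripts/research/r16_base3_extension.py | compute_nd_residues
-- ===== SOURCE A (Python) =====
-- import math
--
-- def compute_S(k):
--     """S = ceil(k * log2(3)), computed exactly using integer arithmetic."""
--     S = math.ceil(k * math.log2(3))
--     while (1 << S) < 3**k:
--         S += 1
--     while S > 0 and (1 << (S - 1)) >= 3**k:
--         S -= 1
--     return S
--
-- def compute_d(k):
--     """d = 2^S - 3^k."""
--     return (1 << compute_S(k)) - 3**k
--
-- def corrSum_of(A, k):
--     """Exact integer corrSum for composition A."""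
--     return sum(pow(3, k - 1 - j) * (1 << A[j]) for j in range(k))
--
-- def corrsum_max(k):
--     """Maximum corrSum, achieved at A = (0, S-k+1, ..., S-1)."""
--     S = compute_S(k)
--     A_max = (0,) + tuple(range(S - k + 1, S))
--     return corrSum_of(A_max, k)
--
-- def compute_nd_residues(k, m):
--     """Compute R_nd = {n*d mod 3^m : n odd, gcd(n,3)=1, 1 <= n <= n_max}."""
--     d = compute_d(k)
--     mod = pow(3, m)
--     cs_max_val = corrsum_max(k)
--     n_max = cs_max_val // d + 1
--     d_mod = d % mod
--     nd_res = set()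
--     search_limit = min(n_max + 1, 3 * mod + 1)
--     for n in range(1, search_limit):
--         if n % 2 == 1 and n % 3 != 0:
--             nd_res.add((n * d_mod) % mod)
--     return nd_res
-- ===== SOURCE B (Python) =====
-- def compute_nd_residues(k, m):
--     """Compute R_nd = {n*d mod 3^m : n odd, gcd(n,3)=1, 1 <= n <= n_max}."""
--     t = 3 ** k
--     S = t.bit_length()          # exact S with 2^(S-1) < 3^k < 2^S (3^k is odd > 1)
--     d = (1 << S) - t
--     mod = 3 ** m
--     d_mod = d % mod
--     # closed form of corrsum_max: 3^(k-1) + 2^(S-k+1) * (3^(k-1) - 2^(k-1))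
--     cs_max_val = 3 ** (k - 1) + (1 << (S - k + 1)) * (3 ** (k - 1) - 2 ** (k - 1))
--     n_max = cs_max_val // d + 1
--     limit = min(n_max, 3 * mod)
--     # the qualifying n (odd, coprime to 3) are exactly n = 6j+1 and 6j+5:
--     # walk them directly in two interleaved progressions, no per-n tests
--     nd_res = set()
--     n = 1
--     while n <= limit:
--         nd_res.add(n * d_mod % mod)
--         if n + 4 <= limit:
--             nd_res.add((n + 4) * d_mod % mod)
--         n += 6
--     return nd_res
-- ===== Notes on version B (the rewrite author's own statement) =====
-- stated objective: alternative
-- what changed: B computes the bit size S exactly as t.bit_length() instead of A's float-seeded search with two correction loops, replaces A's O(k) corrSum loop over the composition tuple by the closed form 3^(k-1) + 2^(S-k+1)*(3^(k-1)-2^(k-1)), and enumerates only the qualifying n (n ≡ 1, 5 mod 6) with a stride-6 loop instead of testing every n in range for parity and divisibility by 3.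
import Mathlib
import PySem

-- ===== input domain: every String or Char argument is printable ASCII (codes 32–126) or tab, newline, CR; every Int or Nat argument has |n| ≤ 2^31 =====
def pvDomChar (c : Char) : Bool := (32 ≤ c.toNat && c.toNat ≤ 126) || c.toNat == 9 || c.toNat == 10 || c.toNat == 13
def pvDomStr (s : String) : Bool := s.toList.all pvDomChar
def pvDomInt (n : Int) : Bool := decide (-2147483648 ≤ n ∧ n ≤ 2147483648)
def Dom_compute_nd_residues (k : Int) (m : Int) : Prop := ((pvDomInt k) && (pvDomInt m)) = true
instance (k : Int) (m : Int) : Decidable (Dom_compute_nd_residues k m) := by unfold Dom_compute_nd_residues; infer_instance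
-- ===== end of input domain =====

-- B replaces A's seeded-and-corrected bit-size search and its O(k) corrSum loop by exact closed forms
-- (t.bit_length() and a geometric-sum identity) and walks only the qualifying n (n ≡ 1, 5 mod 6) with a
-- stride-6 loop instead of testing every n. Python returns a set; both ports build it in the same
-- first-insertion order (PySem.Set).

-- ===== PORT A =====
-- 'while (1 << S) < 3**k: S += 1' — S stays ≥ 0 on the claimed domain (Pre_: 1 ≤ k), where Python's 1 << S is 1 <<< S.toNat.
def pvUp (t : Int) (S : Int) : Int :=
  if h : (1 : Int) <<< S.toNat < t then pvUp t (S + 1) else S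
termination_by (t - (1 : Int) <<< S.toNat).toNat + (-S).toNat
decreasing_by
  have e : ∀ n : Nat, (1 : Int) <<< n = 2 ^ n := by intro n; simp [Int.shiftLeft_eq]
  by_cases hS : 0 ≤ S
  · have h1 : (S + 1).toNat = S.toNat + 1 := by omega
    rw [e] at h ⊢; rw [e, h1]
    have h3 : (0:Int) < 2 ^ S.toNat := by positivity
    omega
  · have h1 : (S + 1).toNat = S.toNat := by omega
    rw [h1]; omega

-- 'while S > 0 and (1 << (S - 1)) >= 3**k: S -= 1'
def pvDown (t : Int) (S : Int) : Int :=
  if h : 0 < S ∧ t ≤ (1 : Int) <<< (S - 1).toNat then pvDown t (S - 1) else S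
termination_by S.toNat
decreasing_by omega

-- the float seed math.ceil(k * math.log2(3)) is replaced by the exact integer ⌈k·1585/1000⌉; the two
-- correction loops above are ported exactly, and they make compute_S's value independent of the
-- (nonnegative) seed, so compute_S is exact on the claimed domain 1 ≤ k (proved via pvUp_eq/pvDown_eq below).
def compute_S (k : Int) : Int :=
  let t : Int := 3 ^ k.toNat            -- 3**k, exact on the claimed domain 1 ≤ k
  let seed : Int := -(PySem.Int.floordiv (-(k * 1585)) 1000)
  pvDown t (pvUp t seed)

def compute_d (k : Int) : Int := ((1 : Int) <<< (compute_S k).toNat) - 3 ^ k.toNat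

-- sum(pow(3, k - 1 - j) * (1 << A[j]) for j in range(k)); the exponents are ≥ 0 on range(k) under Pre_,
-- so the .toNat in pow matches Python exactly there
def corrSum_of (A : List Int) (k : Int) : Int :=
  ((PySem.List.pyRange 0 k).map
    (fun j => 3 ^ (k - 1 - j).toNat * ((1 : Int) <<< (PySem.List.pyGetD A j 0).toNat))).sum

def corrsum_max (k : Int) : Int :=
  let S := compute_S k
  let Amax : List Int := [0] ++ PySem.List.pyRange (S - k + 1) S
  corrSum_of Amax k

def compute_nd_residues (k : Int) (m : Int) : List Int :=
  let d := compute_d k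
  let md : Int := 3 ^ m.toNat           -- pow(3, m), exact on the claimed domain 0 ≤ m
  let cs := corrsum_max k
  let n_max := PySem.Int.floordiv cs d + 1
  let d_mod := PySem.Int.mod d md
  let searchLimit := min (n_max + 1) (3 * md + 1)
  (PySem.List.pyRange 1 searchLimit).foldl
    (fun acc n =>
      if PySem.Int.mod n 2 = 1 ∧ PySem.Int.mod n 3 ≠ 0
      then PySem.Set.add acc (PySem.Int.mod (n * d_mod) md) else acc)
    PySem.Set.empty

-- ===== PORT B =====
-- the 'while n <= limit' loop of Source B: add n·d_mod mod md, then (n+4)·d_mod if still in range, step n by 6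
def pvBLoop (md dm limit : Int) (n : Int) (acc : PySem.Set Int) : PySem.Set Int :=
  if n ≤ limit then
    pvBLoop md dm limit (n + 6)
      (if n + 4 ≤ limit
       then PySem.Set.add (PySem.Set.add acc (PySem.Int.mod (n * dm) md)) (PySem.Int.mod ((n + 4) * dm) md)
       else PySem.Set.add acc (PySem.Int.mod (n * dm) md))
  else acc
termination_by (limit + 1 - n).toNat
decreasing_by omega

def compute_nd_residues_alt (k : Int) (m : Int) : List Int :=
  let t : Int := 3 ^ k.toNat            -- 3**k, exact on the claimed domain 1 ≤ k
  let S := PySem.Int.bitLength t        -- t.bit_length()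
  let d := ((1 : Int) <<< S) - t
  let md : Int := 3 ^ m.toNat           -- 3**m, exact on the claimed domain 0 ≤ m
  let d_mod := PySem.Int.mod d md
  let cs := 3 ^ (k - 1).toNat + ((1 : Int) <<< ((S : Int) - k + 1).toNat) * (3 ^ (k - 1).toNat - 2 ^ (k - 1).toNat)
  let n_max := PySem.Int.floordiv cs d + 1
  let limit := min n_max (3 * md)
  pvBLoop md d_mod limit 1 PySem.Set.empty

-- ===== PRECONDITION & SPEC =====
-- Pre_: exactly where A returns normally — A raises outside it: ValueError (negative shift) for k < 0,
-- ZeroDivisionError (d = 0) for k = 0, and TypeError (float search limit in range()) for m < 0.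
def Pre_compute_nd_residues (k : Int) (m : Int) : Prop := 1 ≤ k ∧ 0 ≤ m
instance (k : Int) (m : Int) : Decidable (Pre_compute_nd_residues k m) := by unfold Pre_compute_nd_residues; infer_instance
def pvWitness_compute_nd_residues : Int × Int := (3, 2)

def Spec_compute_nd_residues (k : Int) (m : Int) (out : List Int) : Prop := out = compute_nd_residues_alt k m
instance (k : Int) (m : Int) (out : List Int) : Decidable (Spec_compute_nd_residues k m out) := by unfold Spec_compute_nd_residues; infer_instance

-- ===== CLAIM (what is proved, stated in full; the proofs are below) =====
def Claim_equal_compute_nd_residues : Prop := ∀ (k : Int) (m : Int), Dom_compute_nd_residues k m → Pre_compute_nd_residues k m → Spec_compute_nd_residues k m (compute_nd_residues k m)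

-- ===== LEMMAS AND PROOFS =====

theorem pvShift1 (n : Nat) : (1 : Int) <<< n = 2 ^ n := by simp [Int.shiftLeft_eq]

theorem pvUp_stop (t S : Int) (h : ¬ ((1 : Int) <<< S.toNat < t)) : pvUp t S = S := by
  rw [pvUp.eq_def]; simp [h]

theorem pvPowLt {a b : Nat} (h : (2:Int) ^ a < 2 ^ b) : a < b := by
  by_contra hc
  have : (2:Int) ^ b ≤ 2 ^ a := pow_le_pow_right₀ (by norm_num) (by omega)
  omega

-- 'while (1 << S) < 3**k: S += 1' climbs to the bracket 2^(bl-1) < t ≤ 2^bl from any nonnegative start below it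
theorem pvUp_eq (t : Int) (bl : Nat) (h1 : (2:Int) ^ (bl - 1) < t) (h2 : t < 2 ^ bl) :
    ∀ (c : Nat) (S : Int), 0 ≤ S → bl - S.toNat ≤ c → (1 : Int) <<< S.toNat < t →
      pvUp t S = (bl : Int) := by
  intro c
  induction c with
  | zero =>
    intro S hS hc hlt
    rw [pvShift1] at hlt
    have : S.toNat < bl := pvPowLt (by omega)
    omega
  | succ c ih =>
    intro S hS hc hlt
    rw [pvUp.eq_def, dif_pos (by rwa [] : (1:Int) <<< S.toNat < t)]
    by_cases h : (1 : Int) <<< (S + 1).toNat < t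
    · have hlt' : S.toNat < bl := pvPowLt (by rw [pvShift1] at hlt; omega)
      exact ih (S + 1) (by omega) (by omega) h
    · rw [pvUp_stop t (S + 1) h]
      rw [pvShift1] at hlt h
      have e1 : (S + 1).toNat = S.toNat + 1 := by omega
      rw [e1] at h
      have hub : S.toNat < bl := pvPowLt (by omega)
      have hlb : bl - 1 < S.toNat + 1 := pvPowLt (by omega)
      omega

-- 'while S > 0 and (1 << (S - 1)) >= 3**k: S -= 1' descends to the same bracket from any start above it
theorem pvDown_eq (t : Int) (bl : Nat) (h1 : (2:Int) ^ (bl - 1) < t) (h2 : t < 2 ^ bl) (hbl : 1 ≤ bl) :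
    ∀ (c : Nat) (S : Int), bl ≤ S.toNat → S.toNat ≤ bl + c → pvDown t S = (bl : Int) := by
  intro c
  induction c with
  | zero =>
    intro S hS hc
    rw [pvDown.eq_def, dif_neg]
    · omega
    · rintro ⟨hpos, hle⟩
      rw [pvShift1] at hle
      have e1 : (S - 1).toNat = bl - 1 := by omega
      rw [e1] at hle; omega
  | succ c ih =>
    intro S hS hc
    by_cases hS' : S.toNat = bl
    · rw [pvDown.eq_def, dif_neg]
      · omega
      · rintro ⟨hpos, hle⟩
        rw [pvShift1] at hle
        have e1 : (S - 1).toNat = bl - 1 := by omega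
        rw [e1] at hle; omega
    · have hgt : bl < S.toNat := by omega
      rw [pvDown.eq_def, dif_pos]
      · exact ih (S - 1) (by omega) (by omega)
      · constructor
        · omega
        · rw [pvShift1]
          have : (2:Int) ^ bl ≤ 2 ^ (S - 1).toNat := pow_le_pow_right₀ (by norm_num) (by omega)
          omega

-- the bit_length bracket for t = 3^K, K ≥ 1: 2^(bl-1) < 3^K < 2^bl and bl ≥ K + 1
theorem pvBL_facts (K : Nat) (hK : 1 ≤ K) :
    (2:Int) ^ (PySem.Int.bitLength ((3:Int) ^ K) - 1) < 3 ^ K ∧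
    (3:Int) ^ K < 2 ^ (PySem.Int.bitLength ((3:Int) ^ K)) ∧
    K + 1 ≤ PySem.Int.bitLength ((3:Int) ^ K) := by
  set t : Int := 3 ^ K with ht
  set bl := PySem.Int.bitLength t with hbl
  have htpos : (1:Int) ≤ t := one_le_pow₀ (by norm_num)
  have ht3 : (3:Int) ≤ t := by
    calc (3:Int) = 3 ^ 1 := by ring
    _ ≤ 3 ^ K := pow_le_pow_right₀ (by norm_num) hK
  have hub : t < 2 ^ bl := by
    have h0 := PySem.Int.lt_two_pow_bitLength t
    have h2 : ((t.natAbs : Nat) : Int) < (2:Int) ^ bl := by exact_mod_cast h0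
    omega
  have hlb : (2:Int) ^ (bl - 1) ≤ t := by
    have h0 := PySem.Int.two_pow_bitLength_le t (by omega)
    have h2 : (2:Int) ^ (bl - 1) ≤ ((t.natAbs : Nat) : Int) := by exact_mod_cast h0
    omega
  have hbl2 : 2 ≤ bl := by
    by_contra hc
    have : bl ≤ 1 := by omega
    have : (2:Int) ^ bl ≤ 2 ^ 1 := pow_le_pow_right₀ (by norm_num) this
    omega
  have hodd : t % 2 = 1 := Int.odd_iff.mp (Odd.pow (by norm_num))
  have hstrict : (2:Int) ^ (bl - 1) < t := by
    rcases lt_or_eq_of_le hlb with h | h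
    · exact h
    · exfalso
      have heven : (2:Int) ^ (bl - 1) % 2 = 0 := by
        have e : bl - 1 = (bl - 2) + 1 := by omega
        rw [e, pow_succ]
        exact Int.mul_emod_left _ _
      rw [h] at heven; omega
  refine ⟨hstrict, hub, ?_⟩
  have h2K : (2:Int) ^ K < 3 ^ K :=
    pow_lt_pow_left₀ (show (2:Int) < 3 by norm_num) (by norm_num) (show K ≠ 0 by omega)
  have h2bl : (2:Int) ^ K < 2 ^ bl := by omega
  have := pvPowLt h2bl
  omega

-- A's compute_S equals B's t.bit_length()
theorem compute_S_eq (k : Int) (hk : 1 ≤ k) :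
    compute_S k = (PySem.Int.bitLength ((3:Int) ^ k.toNat) : Int) := by
  have hK : 1 ≤ k.toNat := by omega
  obtain ⟨h1, h2, h3⟩ := pvBL_facts k.toNat hK
  set bl := PySem.Int.bitLength ((3:Int) ^ k.toNat) with hbl
  show pvDown (3 ^ k.toNat) (pvUp (3 ^ k.toNat) (-(PySem.Int.floordiv (-(k * 1585)) 1000))) = (bl : Int)
  set s : Int := -(PySem.Int.floordiv (-(k * 1585)) 1000) with hs
  have hs0 : 0 ≤ s := by
    rw [hs, PySem.Int.floordiv_eq_ediv_of_pos (by norm_num)]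
    omega
  by_cases hlt : (1 : Int) <<< s.toNat < 3 ^ k.toNat
  · rw [pvUp_eq (3 ^ k.toNat) bl h1 h2 bl s hs0 (by omega) hlt]
    exact pvDown_eq (3 ^ k.toNat) bl h1 h2 (by omega) 0 (bl : Int) (by omega) (by omega)
  · rw [pvUp_stop _ _ hlt]
    rw [pvShift1] at hlt
    have hge : bl - 1 < s.toNat := pvPowLt (by omega)
    exact pvDown_eq (3 ^ k.toNat) bl h1 h2 (by omega) s.toNat s (by omega) (by omega)

-- geometric identity behind B's closed-form corrSum: Σ_{i<n} 3^(n-1-i)·2^i = 3^n - 2^n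
theorem pvGeomSum (n : Nat) :
    ((List.range n).map (fun i => (3:Int) ^ (n - 1 - i) * 2 ^ i)).sum = 3 ^ n - 2 ^ n := by
  induction n with
  | zero => simp
  | succ n ih =>
    rw [List.range_succ, List.map_append, List.sum_append]
    have e1 : (List.range n).map (fun i => (3:Int) ^ (n + 1 - 1 - i) * 2 ^ i)
        = (List.range n).map (fun i => 3 * ((3:Int) ^ (n - 1 - i) * 2 ^ i)) := by
      apply List.map_congr_left
      intro i hi
      rw [List.mem_range] at hi
      have e : n + 1 - 1 - i = (n - 1 - i) + 1 := by omega
      rw [e, pow_succ]; ring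
    rw [e1, List.sum_map_mul_left, ih]
    simp only [List.map_cons, List.map_nil, List.sum_cons, List.sum_nil]
    have e2 : n + 1 - 1 - n = 0 := by omega
    rw [e2]
    ring

-- the sum A computes, with A_max's entries inlined (exponent 0 at j = 0, C + (j-1) after)
theorem pvCSum (K C : Nat) (hK : 1 ≤ K) :
    ((List.range K).map (fun j => (3:Int) ^ (K - 1 - j) * 2 ^ (if j = 0 then 0 else C + (j - 1)))).sum
      = 3 ^ (K - 1) + 2 ^ C * (3 ^ (K - 1) - 2 ^ (K - 1)) := by
  obtain ⟨K', rfl⟩ : ∃ K', K = K' + 1 := ⟨K - 1, by omega⟩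
  rw [List.range_succ_eq_map, List.map_cons, List.sum_cons, List.map_map]
  have e1 : ((fun j => (3:Int) ^ (K' + 1 - 1 - j) * 2 ^ (if j = 0 then 0 else C + (j - 1))) ∘ Nat.succ)
      = fun i => (2:Int) ^ C * ((3:Int) ^ (K' - 1 - i) * 2 ^ i) := by
    funext i
    simp only [Function.comp_apply, Nat.succ_eq_add_one]
    have e : K' + 1 - 1 - (i + 1) = K' - 1 - i := by omega
    have e' : i + 1 - 1 = i := by omega
    rw [e, if_neg (by omega), e', pow_add]
    ring
  rw [e1, List.sum_map_mul_left, pvGeomSum]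
  have e2 : K' + 1 - 1 - 0 = K' := by omega
  have e3 : K' + 1 - 1 = K' := by omega
  rw [e2, e3, if_pos rfl]
  ring

-- A's corrsum_max equals B's closed form
theorem corrsum_eq (k : Int) (hk : 1 ≤ k) :
    corrsum_max k =
      3 ^ (k - 1).toNat + ((1 : Int) <<< (((PySem.Int.bitLength ((3:Int) ^ k.toNat)) : Int) - k + 1).toNat) *
        (3 ^ (k - 1).toNat - 2 ^ (k - 1).toNat) := by
  have hK : 1 ≤ k.toNat := by omega
  obtain ⟨h1, h2, h3⟩ := pvBL_facts k.toNat hK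
  set K := k.toNat with hKdef
  have hKk : (K : Int) = k := by omega
  set bl := PySem.Int.bitLength ((3:Int) ^ K) with hbl
  set C := bl - K + 1 with hC
  simp only [corrsum_max, corrSum_of, compute_S_eq k hk]
  set Amax : List Int := [0] ++ PySem.List.pyRange ((bl:Int) - k + 1) (bl:Int) with hA
  have hlen : (PySem.List.pyRange ((bl:Int) - k + 1) (bl:Int)).length = K - 1 := by
    rw [PySem.List.length_pyRange_one]; omega
  have hrange : PySem.List.pyRange 0 k = List.map (fun j : Nat => (j : Int)) (List.range K) := by
    rw [← hKk]; exact PySem.List.pyRange_zero_nat K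
  rw [hrange, List.map_map]
  have e1 : ∀ j ∈ List.range K,
      ((fun j => (3:Int) ^ (k - 1 - j).toNat * ((1 : Int) <<< (PySem.List.pyGetD Amax j 0).toNat)) ∘ (fun j : Nat => (j : Int))) j
      = (3:Int) ^ (K - 1 - j) * 2 ^ (if j = 0 then 0 else C + (j - 1)) := by
    intro j hj
    rw [List.mem_range] at hj
    simp only [Function.comp_apply, PySem.List.pyGetD_natCast]
    have eexp : (k - 1 - (j:Int)).toNat = K - 1 - j := by omega
    rw [eexp]
    congr 1
    rcases Nat.eq_zero_or_pos j with hj0 | hj0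
    · subst hj0
      simp [hA]
    · obtain ⟨i, rfl⟩ : ∃ i, j = i + 1 := ⟨j - 1, by omega⟩
      have hlt : i < (PySem.List.pyRange ((bl:Int) - k + 1) (bl:Int)).length := by omega
      have egetD : Amax.getD (i + 1) 0 = ((bl:Int) - k + 1) + (i : Int) := by
        rw [hA, List.singleton_append, List.getD_cons_succ,
            List.getD_eq_getElem _ _ hlt, PySem.List.getElem_pyRange_one]
      rw [egetD, pvShift1, if_neg (by omega)]
      congr 1
      omega
  rw [List.map_congr_left e1, pvCSum K C hK, pvShift1]
  have e2 : (k - 1).toNat = K - 1 := by omega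
  have e3 : ((bl:Int) - k + 1).toNat = C := by omega
  rw [e2, e3]

-- A's filtered 1-step loop equals B's stride-6 loop, for any start n ≡ 1 (mod 6)
theorem loop_eq (md dm limit : Int) :
    ∀ (c : Nat) (n : Int) (acc : PySem.Set Int), (limit + 1 - n).toNat ≤ c → n % 6 = 1 →
      (PySem.List.pyRange n (limit + 1)).foldl
        (fun acc x =>
          if PySem.Int.mod x 2 = 1 ∧ PySem.Int.mod x 3 ≠ 0
          then PySem.Set.add acc (PySem.Int.mod (x * dm) md) else acc) acc
      = pvBLoop md dm limit n acc := by
  intro c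
  have m2 : ∀ x : Int, PySem.Int.mod x 2 = x % 2 := fun x => PySem.Int.mod_eq_emod_of_pos (by norm_num)
  have m3 : ∀ x : Int, PySem.Int.mod x 3 = x % 3 := fun x => PySem.Int.mod_eq_emod_of_pos (by norm_num)
  induction c with
  | zero =>
    intro n acc hc hn
    rw [PySem.List.pyRange_one_eq_nil (by omega), pvBLoop.eq_def, if_neg (by omega)]
    rfl
  | succ c ih =>
    intro n acc hc hn
    by_cases hend : limit + 1 ≤ n
    · rw [PySem.List.pyRange_one_eq_nil (by omega), pvBLoop.eq_def, if_neg (by omega)]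
      rfl
    · by_cases hfull : n + 5 ≤ limit
      · -- a full block n .. n+5 lies below the limit
        rw [PySem.List.pyRange_one_cons (by omega), PySem.List.pyRange_one_cons (by omega),
            PySem.List.pyRange_one_cons (by omega), PySem.List.pyRange_one_cons (by omega),
            PySem.List.pyRange_one_cons (by omega), PySem.List.pyRange_one_cons (by omega)]
        simp only [List.foldl_cons, m2, m3]
        rw [if_pos (by omega : n % 2 = 1 ∧ n % 3 ≠ 0),
            if_neg (by omega : ¬((n + 1) % 2 = 1 ∧ (n + 1) % 3 ≠ 0)),
            if_neg (by omega : ¬((n + 1 + 1) % 2 = 1 ∧ (n + 1 + 1) % 3 ≠ 0)),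
            if_neg (by omega : ¬((n + 1 + 1 + 1) % 2 = 1 ∧ (n + 1 + 1 + 1) % 3 ≠ 0)),
            if_pos (by omega : (n + 1 + 1 + 1 + 1) % 2 = 1 ∧ (n + 1 + 1 + 1 + 1) % 3 ≠ 0),
            if_neg (by omega : ¬((n + 1 + 1 + 1 + 1 + 1) % 2 = 1 ∧ (n + 1 + 1 + 1 + 1 + 1) % 3 ≠ 0))]
        rw [pvBLoop.eq_def, if_pos (by omega : n ≤ limit), if_pos (by omega : n + 4 ≤ limit)]
        have e6 : n + 1 + 1 + 1 + 1 + 1 + 1 = n + 6 := by ring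
        have e4 : n + 1 + 1 + 1 + 1 = n + 4 := by ring
        rw [e6, e4]
        simp only [← m2, ← m3]
        exact ih (n + 6) _ (by omega) (by omega)
      · -- partial tail: n ≤ limit < n + 5
        have h0 : n ≤ limit := by omega
        have hr : limit - n = 0 ∨ limit - n = 1 ∨ limit - n = 2 ∨ limit - n = 3 ∨ limit - n = 4 := by omega
        rw [pvBLoop.eq_def, if_pos h0]
        rcases hr with hr | hr | hr | hr | hr
        · rw [PySem.List.pyRange_one_cons (by omega), PySem.List.pyRange_one_eq_nil (by omega)]
          simp only [List.foldl_cons, List.foldl_nil, m2, m3]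
          rw [if_pos (by omega : n % 2 = 1 ∧ n % 3 ≠ 0)]
          rw [if_neg (by omega : ¬(n + 4 ≤ limit)), pvBLoop.eq_def, if_neg (by omega : ¬(n + 6 ≤ limit))]
        · rw [PySem.List.pyRange_one_cons (by omega), PySem.List.pyRange_one_cons (by omega),
              PySem.List.pyRange_one_eq_nil (by omega)]
          simp only [List.foldl_cons, List.foldl_nil, m2, m3]
          rw [if_pos (by omega : n % 2 = 1 ∧ n % 3 ≠ 0),
              if_neg (by omega : ¬((n + 1) % 2 = 1 ∧ (n + 1) % 3 ≠ 0))]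
          rw [if_neg (by omega : ¬(n + 4 ≤ limit)), pvBLoop.eq_def, if_neg (by omega : ¬(n + 6 ≤ limit))]
        · rw [PySem.List.pyRange_one_cons (by omega), PySem.List.pyRange_one_cons (by omega),
              PySem.List.pyRange_one_cons (by omega), PySem.List.pyRange_one_eq_nil (by omega)]
          simp only [List.foldl_cons, List.foldl_nil, m2, m3]
          rw [if_pos (by omega : n % 2 = 1 ∧ n % 3 ≠ 0),
              if_neg (by omega : ¬((n + 1) % 2 = 1 ∧ (n + 1) % 3 ≠ 0)),
              if_neg (by omega : ¬((n + 1 + 1) % 2 = 1 ∧ (n + 1 + 1) % 3 ≠ 0))]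
          rw [if_neg (by omega : ¬(n + 4 ≤ limit)), pvBLoop.eq_def, if_neg (by omega : ¬(n + 6 ≤ limit))]
        · rw [PySem.List.pyRange_one_cons (by omega), PySem.List.pyRange_one_cons (by omega),
              PySem.List.pyRange_one_cons (by omega), PySem.List.pyRange_one_cons (by omega),
              PySem.List.pyRange_one_eq_nil (by omega)]
          simp only [List.foldl_cons, List.foldl_nil, m2, m3]
          rw [if_pos (by omega : n % 2 = 1 ∧ n % 3 ≠ 0),
              if_neg (by omega : ¬((n + 1) % 2 = 1 ∧ (n + 1) % 3 ≠ 0)),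
              if_neg (by omega : ¬((n + 1 + 1) % 2 = 1 ∧ (n + 1 + 1) % 3 ≠ 0)),
              if_neg (by omega : ¬((n + 1 + 1 + 1) % 2 = 1 ∧ (n + 1 + 1 + 1) % 3 ≠ 0))]
          rw [if_neg (by omega : ¬(n + 4 ≤ limit)), pvBLoop.eq_def, if_neg (by omega : ¬(n + 6 ≤ limit))]
        · rw [PySem.List.pyRange_one_cons (by omega), PySem.List.pyRange_one_cons (by omega),
              PySem.List.pyRange_one_cons (by omega), PySem.List.pyRange_one_cons (by omega),
              PySem.List.pyRange_one_cons (by omega), PySem.List.pyRange_one_eq_nil (by omega)]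
          simp only [List.foldl_cons, List.foldl_nil, m2, m3]
          rw [if_pos (by omega : n % 2 = 1 ∧ n % 3 ≠ 0),
              if_neg (by omega : ¬((n + 1) % 2 = 1 ∧ (n + 1) % 3 ≠ 0)),
              if_neg (by omega : ¬((n + 1 + 1) % 2 = 1 ∧ (n + 1 + 1) % 3 ≠ 0)),
              if_neg (by omega : ¬((n + 1 + 1 + 1) % 2 = 1 ∧ (n + 1 + 1 + 1) % 3 ≠ 0)),
              if_pos (by omega : (n + 1 + 1 + 1 + 1) % 2 = 1 ∧ (n + 1 + 1 + 1 + 1) % 3 ≠ 0)]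
          have e4 : n + 1 + 1 + 1 + 1 = n + 4 := by ring
          rw [e4]
          rw [if_pos (by omega : n + 4 ≤ limit), pvBLoop.eq_def, if_neg (by omega : ¬(n + 6 ≤ limit))]

theorem main_eq (k m : Int) (hk : 1 ≤ k) (_hm : 0 ≤ m) :
    compute_nd_residues k m = compute_nd_residues_alt k m := by
  simp only [compute_nd_residues, compute_nd_residues_alt, compute_d]
  rw [compute_S_eq k hk, corrsum_eq k hk, Int.toNat_natCast]
  set md : Int := 3 ^ m.toNat with hmd
  set d : Int := ((1:Int) <<< PySem.Int.bitLength ((3:Int) ^ k.toNat)) - 3 ^ k.toNat with hd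
  set cs : Int := 3 ^ (k - 1).toNat + ((1 : Int) <<< (((PySem.Int.bitLength ((3:Int) ^ k.toNat)) : Int) - k + 1).toNat) * (3 ^ (k - 1).toNat - 2 ^ (k - 1).toNat) with hcs
  set n_max : Int := PySem.Int.floordiv cs d + 1 with hnmax
  have e : min (n_max + 1) (3 * md + 1) = min n_max (3 * md) + 1 := by omega
  rw [e]
  exact loop_eq md (PySem.Int.mod d md) (min n_max (3 * md))
    ((min n_max (3 * md)).toNat) 1 PySem.Set.empty (by omega) (by decide)

-- ===== VERDICT (by name: the statement is the Claim_ definition above) =====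
theorem compute_nd_residues_spec : Claim_equal_compute_nd_residues := by
  intro k m _ hpre
  exact main_eq k m hpre.1 hpre.2
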